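-- pv_equiv track=rewrite | github.com/Jityan/SSTiGAN | cub_dataset.py | processLabel
-- ===== SOURCE A (Python) =====
-- def processLabel(labels):
--     newlabel = []
--     classlabel = 0
--     for i in range(len(labels)):
--         if (i>0) and (labels[i] != labels[i-1]):
--             classlabel += 1
--         newlabel.append(classlabel)
--     return newlabel, classlabel
-- ===== SOURCE B (Python) =====
-- def processLabel(labels):
--     # Two-pass run-length approach: first collect the length of each maximal
--     # run of equal labels, then emit each run's group index that many times.
--     runs = []                # lengths of the maximal runs, in order
--     cur, cnt = None, 0
--     for x in labels:
--         if cnt and x == cur: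
--             cnt += 1
--         else:
--             if cnt:
--                 runs.append(cnt)
--             cur, cnt = x, 1
--     if cnt:
--         runs.append(cnt)
--     newlabel = []
--     for idx, k in enumerate(runs):
--         newlabel.extend([idx] * k)
--     return newlabel, max(len(runs) - 1, 0)
-- ===== Notes on version B (the rewrite author's own statement) =====
-- stated objective: alternative
-- what changed: Replaced the adjacent-pair index scan (labels[i] vs labels[i-1] with a running class counter) by a two-pass run-length encoding: one pass collects the lengths of maximal runs of equal labels, a second pass emits each run's index repeated by its length; the class count becomes max(len(runs)-1, 0).
import Mathlib
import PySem

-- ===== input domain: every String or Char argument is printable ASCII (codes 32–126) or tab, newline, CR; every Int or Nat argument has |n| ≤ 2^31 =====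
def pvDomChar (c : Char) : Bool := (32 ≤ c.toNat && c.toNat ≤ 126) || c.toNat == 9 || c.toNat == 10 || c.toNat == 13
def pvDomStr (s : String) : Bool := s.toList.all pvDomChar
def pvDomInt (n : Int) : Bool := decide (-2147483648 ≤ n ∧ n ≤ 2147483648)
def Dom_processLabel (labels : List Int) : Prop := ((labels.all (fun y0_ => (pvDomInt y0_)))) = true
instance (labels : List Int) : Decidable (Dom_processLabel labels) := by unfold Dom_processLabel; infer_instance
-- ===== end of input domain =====

-- B replaces A's adjacent-pair index scan by a two-pass run-length encoding (alternative decomposition, same cost).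

-- ===== PORT A =====
def processLabel (labels : List Int) : List Int × Int :=
  (PySem.List.pyRange 0 labels.length 1).foldl
    (fun (st : List Int × Int) i =>
      let c := if i > 0 ∧ PySem.List.pyGet? labels i ≠ PySem.List.pyGet? labels (i - 1) then st.2 + 1 else st.2
      (st.1 ++ [c], c))
    ([], 0)

-- ===== PORT B =====
-- first pass: fold collecting (run lengths so far, current value, current count), then flush
def pvFlush (st : List Nat × Option Int × Nat) : List Nat :=
  if st.2.2 ≠ 0 then st.1 ++ [st.2.2] else st.1

def pvStep (st : List Nat × Option Int × Nat) (x : Int) : List Nat × Option Int × Nat :=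
  if st.2.2 ≠ 0 ∧ some x = st.2.1 then (st.1, st.2.1, st.2.2 + 1)
  else (pvFlush st, some x, 1)

def processLabel_alt (labels : List Int) : List Int × Int :=
  let runs := pvFlush (labels.foldl pvStep ([], none, 0))
  let newlabel := ((runs.zipIdx).map (fun p => List.replicate p.1 (Int.ofNat p.2))).flatten
  (newlabel, max ((runs.length : Int) - 1) 0)

-- ===== PRECONDITION & SPEC =====
def Spec_processLabel (labels : List Int) (out : List Int × Int) : Prop := out = processLabel_alt labels
instance (labels : List Int) (out : List Int × Int) : Decidable (Spec_processLabel labels out) := by unfold Spec_processLabel; infer_instance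

-- ===== CLAIM (what is proved, stated in full; the proofs are below) =====
def Claim_equal_processLabel : Prop := ∀ (labels : List Int), Dom_processLabel labels → Spec_processLabel labels (processLabel labels)

-- ===== LEMMAS AND PROOFS =====

-- reference semantics: sim prev c xs processes the tail xs given previous label prev and current class c
def sim (prev c : Int) : List Int → List Int × Int
  | [] => ([], c)
  | x :: xs =>
    let c' := if x = prev then c else c + 1
    let r := sim x c' xs
    (c' :: r.1, r.2)

def simTop : List Int → List Int × Int
  | [] => ([], 0)
  | x :: xs => ((0 : Int) :: (sim x 0 xs).1, (sim x 0 xs).2)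

-- run lengths of xs given a pending run of value v and length k
def runsFrom (v : Int) (k : Nat) : List Int → List Nat
  | [] => [k]
  | x :: xs => if x = v then runsFrom v (k + 1) xs else k :: runsFrom x 1 xs

lemma runsFrom_length_pos (v : Int) (k : Nat) (xs : List Int) : 1 ≤ (runsFrom v k xs).length := by
  induction xs generalizing v k with
  | nil => simp [runsFrom]
  | cons x xs ih =>
    simp only [runsFrom]
    split
    · exact ih _ _
    · simp

lemma sim_append (xs : List Int) : ∀ (prev c y : Int),
    sim prev c (xs ++ [y]) =
      ((sim prev c xs).1 ++ [if y = (prev :: xs).getLast (by simp) then (sim prev c xs).2 else (sim prev c xs).2 + 1],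
       if y = (prev :: xs).getLast (by simp) then (sim prev c xs).2 else (sim prev c xs).2 + 1) := by
  induction xs with
  | nil => intro prev c y; simp [sim]
  | cons x xs ih =>
    intro prev c y
    simp only [List.cons_append, sim, ih x]
    have h : (prev :: x :: xs).getLast (by simp) = (x :: xs).getLast (by simp) := by
      exact (List.getLast_cons (by simp))
    rw [h]

lemma pyGet?_append_left (ys zs : List Int) (i : Int) (h0 : 0 ≤ i) (h1 : i < ys.length) :
    PySem.List.pyGet? (ys ++ zs) i = PySem.List.pyGet? ys i := by
  rw [PySem.List.pyGet?_of_nonneg (ys ++ zs) h0, PySem.List.pyGet?_of_nonneg ys h0]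
  apply List.getElem?_append_left
  omega

lemma A_eq_simTop (labels : List Int) : processLabel labels = simTop labels := by
  induction labels using List.reverseRecOn with
  | nil => simp [processLabel, simTop, PySem.List.pyRange_one_eq_nil]
  | append_singleton ys y ih =>
    unfold processLabel
    have hlen : ((ys ++ [y]).length : Int) = (ys.length : Int) + 1 := by simp
    rw [hlen, PySem.List.pyRange_one_succ_right (by positivity), List.foldl_append]
    have hcongr :
        (PySem.List.pyRange 0 (ys.length : Int) 1).foldl
          (fun (st : List Int × Int) i =>
            let c := if i > 0 ∧ PySem.List.pyGet? (ys ++ [y]) i ≠ PySem.List.pyGet? (ys ++ [y]) (i - 1) then st.2 + 1 else st.2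
            (st.1 ++ [c], c)) ([], 0)
        = (PySem.List.pyRange 0 (ys.length : Int) 1).foldl
          (fun (st : List Int × Int) i =>
            let c := if i > 0 ∧ PySem.List.pyGet? ys i ≠ PySem.List.pyGet? ys (i - 1) then st.2 + 1 else st.2
            (st.1 ++ [c], c)) ([], 0) := by
      apply PySem.List.foldl_congr_mem
      intro acc i hi
      rw [PySem.List.mem_pyRange_one] at hi
      by_cases hpos : 0 < i
      · rw [pyGet?_append_left ys [y] i (by omega) (by omega),
            pyGet?_append_left ys [y] (i - 1) (by omega) (by omega)]
      · simp [hpos]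
    rw [hcongr]
    have hpref : (PySem.List.pyRange 0 (ys.length : Int) 1).foldl
          (fun (st : List Int × Int) i =>
            let c := if i > 0 ∧ PySem.List.pyGet? ys i ≠ PySem.List.pyGet? ys (i - 1) then st.2 + 1 else st.2
            (st.1 ++ [c], c)) ([], 0) = simTop ys := by
      rw [← ih]; rfl
    rw [hpref]
    -- the appended step at index ys.length
    match ys with
    | [] => simp [simTop, sim]
    | x :: xs =>
      have hy : PySem.List.pyGet? (x :: (xs ++ [y])) (((x :: xs).length : Int)) = some y :=
        PySem.List.pyGet?_append_length (x :: xs) [] y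
      have hprev : PySem.List.pyGet? (x :: (xs ++ [y])) (((x :: xs).length : Int) - 1)
          = some ((x :: xs).getLast (by simp)) := by
        have h1 : ((x :: xs).length : Int) - 1 = ((xs.length : Nat) : Int) := by simp
        have h2 : PySem.List.pyGet? (x :: (xs ++ [y])) (((xs.length : Nat) : Int))
            = PySem.List.pyGet? (x :: xs) (((xs.length : Nat) : Int)) :=
          pyGet?_append_left (x :: xs) [y] _ (by positivity) (by simp)
        rw [h1, h2, PySem.List.pyGet?_natCast, List.getElem?_eq_getElem (by simp)]
        rw [List.getLast_eq_getElem]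
        rfl
      have hc : ((((x :: xs).length : Int) > 0) ∧ some y ≠ some ((x :: xs).getLast (by simp)))
          ↔ ¬ (y = (x :: xs).getLast (by simp)) := by
        constructor
        · rintro ⟨-, h⟩ he; exact h (by rw [he])
        · intro h
          refine ⟨by exact_mod_cast Nat.succ_pos xs.length, ?_⟩
          intro hsome
          exact h (Option.some.inj hsome)
      simp only [List.foldl_cons, List.foldl_nil, List.cons_append]
      simp only [hy, hprev, hc]
      simp only [simTop, sim_append xs x 0 y]
      by_cases hlast : y = (x :: xs).getLast (by simp)
      · simp [hlast]
      · simp [hlast]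

lemma foldl_step_runsFrom (xs : List Int) : ∀ (runs : List Nat) (v : Int) (k : Nat), 0 < k →
    pvFlush (xs.foldl pvStep (runs, some v, k)) = runs ++ runsFrom v k xs := by
  induction xs with
  | nil => intro runs v k hk; simp [pvFlush, runsFrom, Nat.pos_iff_ne_zero.mp hk]
  | cons x xs ih =>
    intro runs v k hk
    simp only [List.foldl_cons, pvStep, runsFrom]
    by_cases hx : x = v
    · rw [if_pos (by simp [hx, Nat.pos_iff_ne_zero.mp hk]), if_pos hx]
      exact ih runs v (k + 1) (by omega)
    · rw [if_neg (by simp [hx]), if_neg hx]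
      have : pvFlush (runs, some v, k) = runs ++ [k] := by
        simp [pvFlush, Nat.pos_iff_ne_zero.mp hk]
      rw [this, ih (runs ++ [k]) x 1 (by omega), List.append_assoc]
      rfl

lemma runsFrom_assemble (xs : List Int) : ∀ (v : Int) (k n : Nat),
    (((runsFrom v k xs).zipIdx n).map (fun p => List.replicate p.1 (Int.ofNat p.2))).flatten
      = List.replicate k (Int.ofNat n) ++ (sim v (Int.ofNat n) xs).1
    ∧ (sim v (Int.ofNat n) xs).2 = Int.ofNat (n + (runsFrom v k xs).length - 1) := by
  induction xs with
  | nil => intro v k n; simp [runsFrom, sim]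
  | cons x xs ih =>
    intro v k n
    by_cases hx : x = v
    · subst hx
      obtain ⟨h1, h2⟩ := ih x (k + 1) n
      rw [show runsFrom x k (x :: xs) = runsFrom x (k + 1) xs from by simp [runsFrom]]
      rw [show sim x (Int.ofNat n) (x :: xs)
            = ((Int.ofNat n) :: (sim x (Int.ofNat n) xs).1, (sim x (Int.ofNat n) xs).2) from by
          simp [sim]]
      refine ⟨?_, h2⟩
      rw [h1, List.replicate_succ']
      simp
    · obtain ⟨h1, h2⟩ := ih x 1 (n + 1)
      rw [show runsFrom v k (x :: xs) = k :: runsFrom x 1 xs from by simp [runsFrom, hx]]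
      rw [show sim v (Int.ofNat n) (x :: xs)
            = ((Int.ofNat n + 1) :: (sim x (Int.ofNat n + 1) xs).1, (sim x (Int.ofNat n + 1) xs).2) from by
          simp [sim, hx]]
      have hcast : Int.ofNat n + 1 = Int.ofNat (n + 1) := by simp
      constructor
      · simp only [List.zipIdx, List.map_cons, List.flatten_cons, h1, hcast]
        simp
      · rw [hcast, h2]
        have hpos := runsFrom_length_pos x 1 xs
        congr 1
        simp only [List.length_cons]
        omega

lemma B_eq_simTop (labels : List Int) : processLabel_alt labels = simTop labels := by
  match labels with
  | [] => simp [processLabel_alt, simTop, pvFlush]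
  | x :: xs =>
    unfold processLabel_alt
    have h0 : pvFlush ((x :: xs).foldl pvStep ([], none, 0)) = runsFrom x 1 xs := by
      simp only [List.foldl_cons, pvStep]
      rw [if_neg (by simp)]
      have hf : pvFlush (([], none, 0) : List Nat × Option Int × Nat) = [] := by simp [pvFlush]
      exact foldl_step_runsFrom xs [] x 1 (by omega)
    obtain ⟨h1, h2⟩ := runsFrom_assemble xs x 1 0
    simp only [h0, simTop, Prod.mk.injEq]
    constructor
    · simpa using h1
    · have hpos := runsFrom_length_pos x 1 xs
      have h2' : (sim x 0 xs).2 = Int.ofNat ((runsFrom x 1 xs).length - 1) := by simpa using h2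
      rw [h2', Int.ofNat_eq_natCast]
      omega

-- ===== VERDICT (by name: the statement is the Claim_ definition above) =====
theorem processLabel_spec : Claim_equal_processLabel := by
  intro labels _
  unfold Spec_processLabel
  rw [A_eq_simTop, B_eq_simTop]
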